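-- pv_equiv track=rewrite | github.com/AphiwitPluemchit/Backend-Bluelock-007 | ocr/pdf_generator/benchmark.py | canonicalize_doc_text
-- ===== SOURCE A (Python) =====
-- TEMPLATE_LINES = [
--     "CERTIFICATE OF COMPLETION",
--     "THAI MOOC",
--     "Thailand Massive Open Online Courses",
--     "THIS CERTIFICATE IS AWARDED TO",
--     "",
--     "Assoc.Prof.Dr. Thapanee Thammeter",
--     "Director of Thailand Cyber University Project (TCU)",
-- ]
--
-- def canonicalize_doc_text(text: str, include_template: bool = True) -> str:
--     """Canonicalize multi-line document text into header -> body -> footer order.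
--
--     - Splits lines, trims and removes empty lines
--     - Classifies lines into header/body/footer by keyword heuristics
--     - If include_template True, ensure template lines are present at the top
--     """
--     if not text:
--         return ""
--     lines = [l.strip() for l in text.splitlines() if l.strip()]
--     header_keys = ("CERTIFICATE", "THAI MOOC", "THAILAND MASSIVE OPEN ONLINE COURSES")
--     footer_keys = ("ASSOC.PROF", "THAPANEE", "DIRECTOR", "TCU")
--     headers, bodies, footers = [], [], []
--     for l in lines:
--         u = l.upper()
--         if any(k in u for k in header_keys):
--             headers.append(l)
--         elif any(k in u for k in footer_keys):
--             footers.append(l)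
--         else:
--             bodies.append(l)
--
--     ordered = []
--     if include_template:
--         for t in TEMPLATE_LINES:
--             if t and t not in ordered:
--                 ordered.append(t)
--     ordered += headers + bodies + footers
--
--     # remove duplicates while preserving order
--     seen = set()
--     uniq = []
--     for l in ordered:
--         if l and l not in seen:
--             seen.add(l)
--             uniq.append(l)
--     return "\n".join(uniq)
-- ===== SOURCE B (Python) =====
-- TEMPLATE_LINES = [
--     "CERTIFICATE OF COMPLETION",
--     "THAI MOOC",
--     "Thailand Massive Open Online Courses",
--     "THIS CERTIFICATE IS AWARDED TO",
--     "",
--     "Assoc.Prof.Dr. Thapanee Thammeter",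
--     "Director of Thailand Cyber University Project (TCU)",
-- ]
--
-- def _classify(l):
--     u = l.upper()
--     if any(k in u for k in ("CERTIFICATE", "THAI MOOC", "THAILAND MASSIVE OPEN ONLINE COURSES")):
--         return 0
--     if any(k in u for k in ("ASSOC.PROF", "THAPANEE", "DIRECTOR", "TCU")):
--         return 2
--     return 1
--
-- def canonicalize_doc_text(text: str, include_template: bool = True) -> str:
--     """Header/body/footer ordering via one stable sort on a 0/1/2 classify key,
--     then an order-preserving dedup with dict.fromkeys."""
--     if not text:
--         return ""
--     lines = [l.strip() for l in text.splitlines() if l.strip()]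
--     ordered = sorted(lines, key=_classify)
--     if include_template:
--         ordered = [t for t in TEMPLATE_LINES if t] + ordered
--     return "\n".join(dict.fromkeys(ordered))
-- ===== Notes on version B (the rewrite author's own statement) =====
-- stated objective: alternative
-- what changed: Replaces A's three-bucket partition loop with one stable sort on a 0/1/2 classify key and A's hand-rolled seen-set dedup loop with dict.fromkeys (template prepend becomes a plain filter).
import Mathlib
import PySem

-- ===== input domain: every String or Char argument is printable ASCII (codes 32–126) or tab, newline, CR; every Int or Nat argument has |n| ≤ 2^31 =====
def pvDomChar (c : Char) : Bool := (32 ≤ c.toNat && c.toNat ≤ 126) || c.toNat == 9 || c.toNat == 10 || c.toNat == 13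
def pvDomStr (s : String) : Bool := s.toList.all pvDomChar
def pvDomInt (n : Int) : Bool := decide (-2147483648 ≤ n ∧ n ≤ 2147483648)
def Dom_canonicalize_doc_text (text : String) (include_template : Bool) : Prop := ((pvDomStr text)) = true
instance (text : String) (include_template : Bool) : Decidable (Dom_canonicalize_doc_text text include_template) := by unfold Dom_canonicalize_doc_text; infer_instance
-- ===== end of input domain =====

-- B replaces A's three-bucket partition loop and hand-rolled seen-set dedup by one stable
-- sort on a 0/1/2 classify key plus dict.fromkeys; alternative decomposition, same cost.

-- ===== PORT A =====
def pvTemplateLines : List String := [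
  "CERTIFICATE OF COMPLETION",
  "THAI MOOC",
  "Thailand Massive Open Online Courses",
  "THIS CERTIFICATE IS AWARDED TO",
  "",
  "Assoc.Prof.Dr. Thapanee Thammeter",
  "Director of Thailand Cyber University Project (TCU)"]

def pvHeaderKeys : List String := ["CERTIFICATE", "THAI MOOC", "THAILAND MASSIVE OPEN ONLINE COURSES"]
def pvFooterKeys : List String := ["ASSOC.PROF", "THAPANEE", "DIRECTOR", "TCU"]

def pvAnyIn (keys : List String) (u : String) : Bool :=
  keys.any (fun k => PySem.Str.isIn k u)

-- the classification loop body of A: (headers, bodies, footers) buckets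
def pvBucketStep (st : List String × List String × List String) (l : String) :
    List String × List String × List String :=
  let u := PySem.Str.upper l
  if pvAnyIn pvHeaderKeys u then (st.1 ++ [l], st.2.1, st.2.2)
  else if pvAnyIn pvFooterKeys u then (st.1, st.2.1, st.2.2 ++ [l])
  else (st.1, st.2.1 ++ [l], st.2.2)

-- A's final dedup loop body: state (seen, uniq)
def pvDedupStep (st : PySem.Set String × List String) (l : String) :
    PySem.Set String × List String :=
  if l ≠ "" ∧ l ∉ st.1 then (PySem.Set.add st.1 l, st.2 ++ [l]) else st

def canonicalize_doc_text (text : String) (include_template : Bool) : String :=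
  if text = "" then ""
  else
    let lines := ((PySem.Str.splitlines text).filter
        (fun l => PySem.Str.strip l ≠ "")).map PySem.Str.strip
    let hbf := lines.foldl pvBucketStep ([], [], [])
    let ordered₀ : List String :=
      if include_template then
        pvTemplateLines.foldl (fun acc t => if t ≠ "" ∧ t ∉ acc then acc ++ [t] else acc) []
      else []
    let ordered := ordered₀ ++ (hbf.1 ++ hbf.2.1 ++ hbf.2.2)
    let uniq := (ordered.foldl pvDedupStep (PySem.Set.empty, [])).2
    PySem.Str.join "\n" uniq

-- ===== PORT B =====
def pvClassify (l : String) : Int :=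
  let u := PySem.Str.upper l
  if pvAnyIn pvHeaderKeys u then 0
  else if pvAnyIn pvFooterKeys u then 2
  else 1

def canonicalize_doc_text_alt (text : String) (include_template : Bool) : String :=
  if text = "" then ""
  else
    let lines := ((PySem.Str.splitlines text).filter
        (fun l => PySem.Str.strip l ≠ "")).map PySem.Str.strip
    let ordered := PySem.List.sorted lines pvClassify
    let ordered' := if include_template then pvTemplateLines.filter (· ≠ "") ++ ordered else ordered
    PySem.Str.join "\n" (PySem.List.dedup ordered')

-- ===== PRECONDITION & SPEC =====
def Spec_canonicalize_doc_text (text : String) (include_template : Bool) (out : String) : Prop := out = canonicalize_doc_text_alt text include_template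
instance (text : String) (include_template : Bool) (out : String) : Decidable (Spec_canonicalize_doc_text text include_template out) := by unfold Spec_canonicalize_doc_text; infer_instance

-- ===== CLAIM (what is proved, stated in full; the proofs are below) =====
def Claim_equal_canonicalize_doc_text : Prop := ∀ (text : String) (include_template : Bool), Dom_canonicalize_doc_text text include_template → Spec_canonicalize_doc_text text include_template (canonicalize_doc_text text include_template)

-- ===== LEMMAS AND PROOFS =====

-- insertBy skips a prefix on which `before` is false
theorem pv_insertBy_append {α : Type} (before : α → α → Bool) (x : α)
    (ys zs : List α) (h : ∀ y ∈ ys, before x y = false) :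
    PySem.List.insertBy before x (ys ++ zs) = ys ++ PySem.List.insertBy before x zs := by
  induction ys with
  | nil => rfl
  | cons y ys ih =>
      have hy : before x y = false := h y (by simp)
      have hrest : ∀ y ∈ ys, before x y = false := fun y hy => h y (by simp [hy])
      simp [PySem.List.insertBy, hy, ih hrest]

-- insertBy appends x at the end when `before` is false everywhere
theorem pv_insertBy_end {α : Type} (before : α → α → Bool) (x : α)
    (ys : List α) (h : ∀ y ∈ ys, before x y = false) :
    PySem.List.insertBy before x ys = ys ++ [x] := by
  have := pv_insertBy_append before x ys [] h
  simpa [PySem.List.insertBy] using this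

-- insertBy puts x in front when `before` holds on every element
theorem pv_insertBy_cons {α : Type} (before : α → α → Bool) (x : α)
    (zs : List α) (h : ∀ z ∈ zs, before x z = true) :
    PySem.List.insertBy before x zs = x :: zs := by
  cases zs with
  | nil => rfl
  | cons z zs => simp [PySem.List.insertBy, h z (by simp)]

-- a stable sort on a {0,1,2}-valued key is the concatenation of the three key-filters
theorem pv_sorted_three (L : List String) (key : String → Int)
    (hk : ∀ l, key l = 0 ∨ key l = 1 ∨ key l = 2) :
    PySem.List.sorted L key =
      L.filter (fun l => key l = 0) ++ L.filter (fun l => key l = 1)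
        ++ L.filter (fun l => key l = 2) := by
  rw [PySem.List.sorted_eq_foldl_insertBy]
  induction L using List.reverseRecOn with
  | nil => rfl
  | append_singleton L x ih =>
      rw [List.foldl_append, List.foldl_cons, List.foldl_nil, ih]
      have hmem : ∀ (v : Int), ∀ z ∈ L.filter (fun l => key l = v), key z = v := by
        intro v z hz
        simpa using (List.mem_filter.mp hz).2
      rcases hk x with hx | hx | hx
      · rw [List.append_assoc,
          pv_insertBy_append (fun a b => decide (key a < key b)) x
            (L.filter (fun l => key l = 0))
            (L.filter (fun l => key l = 1) ++ L.filter (fun l => key l = 2))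
            (by intro y hy; simp [hx, hmem 0 y hy]),
          pv_insertBy_cons (fun a b => decide (key a < key b)) x
            (L.filter (fun l => key l = 1) ++ L.filter (fun l => key l = 2))
            (by intro z hz
                rcases List.mem_append.mp hz with h | h
                · simp [hx, hmem 1 z h]
                · simp [hx, hmem 2 z h])]
        simp [List.filter_append, hx]
      · rw [pv_insertBy_append (fun a b => decide (key a < key b)) x
            (L.filter (fun l => key l = 0) ++ L.filter (fun l => key l = 1))
            (L.filter (fun l => key l = 2))
            (by intro y hy
                rcases List.mem_append.mp hy with h | h
                · simp [hx, hmem 0 y h]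
                · simp [hx, hmem 1 y h]),
          pv_insertBy_cons (fun a b => decide (key a < key b)) x
            (L.filter (fun l => key l = 2))
            (by intro z hz; simp [hx, hmem 2 z hz])]
        simp [List.filter_append, hx]
      · rw [pv_insertBy_end (fun a b => decide (key a < key b)) x
            (L.filter (fun l => key l = 0) ++ L.filter (fun l => key l = 1)
              ++ L.filter (fun l => key l = 2))
            (by intro y hy
                rcases List.mem_append.mp hy with h | h
                · rcases List.mem_append.mp h with h | h
                  · simp [hx, hmem 0 y h]
                  · simp [hx, hmem 1 y h]
                · simp [hx, hmem 2 y h])]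
        simp [List.filter_append, hx]

-- the buckets of A's classification loop are the three keyword filters
theorem pv_buckets (L : List String) (h b f : List String) :
    L.foldl pvBucketStep (h, b, f) =
      (h ++ L.filter (fun l => pvAnyIn pvHeaderKeys (PySem.Str.upper l)),
       b ++ L.filter (fun l => !pvAnyIn pvHeaderKeys (PySem.Str.upper l)
              && !pvAnyIn pvFooterKeys (PySem.Str.upper l)),
       f ++ L.filter (fun l => !pvAnyIn pvHeaderKeys (PySem.Str.upper l)
              && pvAnyIn pvFooterKeys (PySem.Str.upper l))) := by
  induction L generalizing h b f with
  | nil => simp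
  | cons l L ih =>
      by_cases hH : pvAnyIn pvHeaderKeys (PySem.Str.upper l) = true
      · simp [pvBucketStep, hH, ih]
      · by_cases hF : pvAnyIn pvFooterKeys (PySem.Str.upper l) = true
        · simp [pvBucketStep, hH, hF, ih]
        · simp [pvBucketStep, hH, hF, ih]

-- the classify key names exactly the same three groups
theorem pv_classify_zero (l : String) :
    decide (pvClassify l = 0) = pvAnyIn pvHeaderKeys (PySem.Str.upper l) := by
  by_cases hH : pvAnyIn pvHeaderKeys (PySem.Str.upper l) = true
  · simp [pvClassify, hH]
  · by_cases hF : pvAnyIn pvFooterKeys (PySem.Str.upper l) = true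
    · simp [pvClassify, hH, hF]
    · simp [pvClassify, hH, hF]

theorem pv_classify_one (l : String) :
    decide (pvClassify l = 1) = (!pvAnyIn pvHeaderKeys (PySem.Str.upper l)
      && !pvAnyIn pvFooterKeys (PySem.Str.upper l)) := by
  by_cases hH : pvAnyIn pvHeaderKeys (PySem.Str.upper l) = true
  · simp [pvClassify, hH]
  · by_cases hF : pvAnyIn pvFooterKeys (PySem.Str.upper l) = true
    · simp [pvClassify, hH, hF]
    · simp [pvClassify, hH, hF]

theorem pv_classify_two (l : String) :
    decide (pvClassify l = 2) = (!pvAnyIn pvHeaderKeys (PySem.Str.upper l)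
      && pvAnyIn pvFooterKeys (PySem.Str.upper l)) := by
  by_cases hH : pvAnyIn pvHeaderKeys (PySem.Str.upper l) = true
  · simp [pvClassify, hH]
  · by_cases hF : pvAnyIn pvFooterKeys (PySem.Str.upper l) = true
    · simp [pvClassify, hH, hF]
    · simp [pvClassify, hH, hF]

theorem pv_classify_three (l : String) :
    pvClassify l = 0 ∨ pvClassify l = 1 ∨ pvClassify l = 2 := by
  by_cases hH : pvAnyIn pvHeaderKeys (PySem.Str.upper l) = true
  · simp [pvClassify, hH]
  · by_cases hF : pvAnyIn pvFooterKeys (PySem.Str.upper l) = true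
    · simp [pvClassify, hH, hF]
    · simp [pvClassify, hH, hF]

-- order-preserving dedup relative to an already-seen set
def pvD (s : List String) (xs : List String) : List String :=
  match xs with
  | [] => []
  | l :: xs => if s.contains l then pvD s xs else l :: pvD (s ++ [l]) xs

theorem pv_foldl_add (xs : List String) (s : List String) :
    List.foldl PySem.Set.add s xs = s ++ pvD s xs := by
  induction xs generalizing s with
  | nil => simp [pvD]
  | cons l xs ih =>
      by_cases hm : l ∈ s
      · simp [PySem.Set.add, pvD, hm, ih]
      · simp only [List.foldl_cons]
        rw [show PySem.Set.add s l = s ++ [l] from by simp [PySem.Set.add, hm], ih, pvD]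
        simp [hm]

theorem pv_dedup_eq (xs : List String) : PySem.List.dedup xs = pvD [] xs := by
  simpa [PySem.List.dedup, PySem.Set.ofList, PySem.Set.empty] using pv_foldl_add xs []

theorem pv_foldl_dedupStep (xs : List String) (s : PySem.Set String) (u : List String)
    (hne : ∀ l ∈ xs, l ≠ "") :
    (xs.foldl pvDedupStep (s, u)).2 = u ++ pvD s xs := by
  induction xs generalizing s u with
  | nil => simp [pvD]
  | cons l xs ih =>
      have hl : l ≠ "" := hne l (by simp)
      have hrest : ∀ l ∈ xs, l ≠ "" := fun l hl => hne l (by simp [hl])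
      by_cases hm : l ∈ s
      · simp [pvDedupStep, hl, hm, pvD, ih _ _ hrest]
      · simp only [List.foldl_cons,
          show pvDedupStep (s, u) l = (PySem.Set.add s l, u ++ [l]) from by
            simp [pvDedupStep, hl, hm]]
        rw [show PySem.Set.add s l = s ++ [l] from by simp [PySem.Set.add, hm],
          ih _ _ hrest, pvD]
        simp [hm]

-- A's template loop equals B's filter (the template lines are distinct literals)
theorem pv_template :
    pvTemplateLines.foldl (fun acc t => if t ≠ "" ∧ t ∉ acc then acc ++ [t] else acc) []
      = pvTemplateLines.filter (· ≠ "") := by decide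

-- the whole pipeline, at the level of the cleaned line list
theorem pv_main (L : List String) (hLne : ∀ l ∈ L, l ≠ "") (inc : Bool) :
    (((if inc then
        pvTemplateLines.foldl (fun acc t => if t ≠ "" ∧ t ∉ acc then acc ++ [t] else acc) []
       else []) ++
      ((L.foldl pvBucketStep ([], [], [])).1 ++ (L.foldl pvBucketStep ([], [], [])).2.1
        ++ (L.foldl pvBucketStep ([], [], [])).2.2)).foldl pvDedupStep (PySem.Set.empty, [])).2
    = PySem.List.dedup
        (if inc then pvTemplateLines.filter (· ≠ "") ++ PySem.List.sorted L pvClassify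
         else PySem.List.sorted L pvClassify) := by
  have hsort : PySem.List.sorted L pvClassify =
      L.filter (fun l => pvClassify l = 0) ++ L.filter (fun l => pvClassify l = 1)
        ++ L.filter (fun l => pvClassify l = 2) :=
    pv_sorted_three L pvClassify pv_classify_three
  have hf0 : L.filter (fun l => pvClassify l = 0)
      = L.filter (fun l => pvAnyIn pvHeaderKeys (PySem.Str.upper l)) :=
    List.filter_congr (fun l _ => pv_classify_zero l)
  have hf1 : L.filter (fun l => pvClassify l = 1)
      = L.filter (fun l => !pvAnyIn pvHeaderKeys (PySem.Str.upper l)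
          && !pvAnyIn pvFooterKeys (PySem.Str.upper l)) :=
    List.filter_congr (fun l _ => pv_classify_one l)
  have hf2 : L.filter (fun l => pvClassify l = 2)
      = L.filter (fun l => !pvAnyIn pvHeaderKeys (PySem.Str.upper l)
          && pvAnyIn pvFooterKeys (PySem.Str.upper l)) :=
    List.filter_congr (fun l _ => pv_classify_two l)
  have hordered :
      (if inc then
        pvTemplateLines.foldl (fun acc t => if t ≠ "" ∧ t ∉ acc then acc ++ [t] else acc) []
       else []) ++
        ((L.foldl pvBucketStep ([], [], [])).1 ++ (L.foldl pvBucketStep ([], [], [])).2.1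
          ++ (L.foldl pvBucketStep ([], [], [])).2.2)
      = (if inc then pvTemplateLines.filter (· ≠ "") ++ PySem.List.sorted L pvClassify
         else PySem.List.sorted L pvClassify) := by
    rw [pv_buckets L [] [] [], hsort, hf0, hf1, hf2, pv_template]
    cases inc <;> simp
  rw [hordered]
  have horderedne : ∀ l ∈ (if inc then
        pvTemplateLines.filter (· ≠ "") ++ PySem.List.sorted L pvClassify
       else PySem.List.sorted L pvClassify), l ≠ "" := by
    intro l hl
    have hs : l ∈ PySem.List.sorted L pvClassify → l ≠ "" := fun h =>
      hLne l ((PySem.List.mem_sorted _ _ _ _).mp h)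
    cases inc with
    | false =>
        rw [if_neg (by simp)] at hl
        exact hs hl
    | true =>
        rw [if_pos rfl] at hl
        rcases List.mem_append.mp hl with h | h
        · have := (List.mem_filter.mp h).2
          simpa using this
        · exact hs h
  rw [pv_foldl_dedupStep _ _ _ horderedne, pv_dedup_eq]
  rfl

-- ===== VERDICT (by name: the statement is the Claim_ definition above) =====
theorem canonicalize_doc_text_spec : Claim_equal_canonicalize_doc_text := by
  intro text include_template _
  unfold Spec_canonicalize_doc_text canonicalize_doc_text canonicalize_doc_text_alt
  by_cases ht : text = ""
  · simp [ht]
  · simp only [ht, if_false]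
    have hne : ∀ l ∈ ((PySem.Str.splitlines text).filter
        (fun l => PySem.Str.strip l ≠ "")).map PySem.Str.strip, l ≠ "" := by
      intro l hl
      obtain ⟨l2, hl2, rfl⟩ := List.mem_map.mp hl
      have h2 := (List.mem_filter.mp hl2).2
      simpa using h2
    exact congrArg (PySem.Str.join "\n") (pv_main _ hne include_template)
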